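-- pv_equiv track=rewrite | github.com/juan-lievano/pobax | scripts/bayesian_posterior_probe/compass_visualize_traj.py | render_grid
-- ===== SOURCE A (Python) =====
-- ARROWS = {"N": "↑", "E": "→", "S": "↓", "W": "←"}
--
-- def render_grid(size, pos_y, pos_x, dir_letter):
--     border = "#" * size
--     grid = [["·" for _ in range(size)] for _ in range(size)]
--     for i in range(size):
--         grid[0][i] = "#"
--         grid[size-1][i] = "#"
--         grid[i][0] = "#"
--         grid[i][size-1] = "#"
--     if 0 <= pos_y < size and 0 <= pos_x < size:
--         grid[pos_y][pos_x] = ARROWS.get(dir_letter, "?")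
--     return "\n".join("".join(row) for row in grid)
-- ===== SOURCE B (Python) =====
-- ARROWS = {"N": "↑", "E": "→", "S": "↓", "W": "←"}
--
-- def render_grid(size, pos_y, pos_x, dir_letter):
--     rows = ["#" * size if y == 0 or y == size - 1 else "#" + "·" * (size - 2) + "#"
--             for y in range(size)]
--     if 0 <= pos_y < size and 0 <= pos_x < size:
--         r = rows[pos_y]
--         rows[pos_y] = r[:pos_x] + ARROWS.get(dir_letter, "?") + r[pos_x + 1:]
--     return "\n".join(rows)
-- ===== Notes on version B (the rewrite author's own statement) =====
-- stated objective: simpler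
-- what changed: B builds each row directly from a string template ('#'*size or '#'+'.'*(size-2)+'#') and overlays the arrow once by string slicing, replacing A's 2D char-grid init, four-cell border-stamping loop and in-place cell overwrite.
import Mathlib
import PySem

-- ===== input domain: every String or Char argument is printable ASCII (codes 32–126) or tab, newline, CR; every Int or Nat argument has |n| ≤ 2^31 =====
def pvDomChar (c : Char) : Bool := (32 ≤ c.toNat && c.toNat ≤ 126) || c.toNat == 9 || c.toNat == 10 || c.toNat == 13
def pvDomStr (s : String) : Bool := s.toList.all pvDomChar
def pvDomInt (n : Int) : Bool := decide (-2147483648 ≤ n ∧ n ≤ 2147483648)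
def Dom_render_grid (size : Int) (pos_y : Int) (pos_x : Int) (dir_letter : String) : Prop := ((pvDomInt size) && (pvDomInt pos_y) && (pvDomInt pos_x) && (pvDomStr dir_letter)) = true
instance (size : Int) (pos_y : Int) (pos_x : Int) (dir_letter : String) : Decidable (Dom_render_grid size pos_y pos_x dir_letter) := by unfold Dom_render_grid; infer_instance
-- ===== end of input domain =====

-- B replaces A's 2D char grid + border-stamping loop + cell overwrite with direct
-- per-row string templates plus a single slice overlay (objective: simpler).

-- ===== PORT A =====
-- ARROWS = {"N": "↑", ...}; each value is a single character, so grid cells are Chars.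
def pvArrows : PySem.Dict String Char :=
  PySem.Dict.ofList [("N", '↑'), ("E", '→'), ("S", '↓'), ("W", '←')]

-- the body of A's `for i in range(size)` loop (four border-cell writes)
def pvStamp (n : Nat) (g : List (List Char)) (i : Nat) : List (List Char) :=
  let g := g.set 0 ((g.getD 0 []).set i '#')
  let g := g.set (n - 1) ((g.getD (n - 1) []).set i '#')
  let g := g.set i ((g.getD i []).set 0 '#')
  let g := g.set i ((g.getD i []).set (n - 1) '#')
  g

def render_grid (size : Int) (pos_y : Int) (pos_x : Int) (dir_letter : String) : String :=
  -- range(size) is empty for size ≤ 0, so size.toNat is exact here; the in-range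
  -- indices pos_y/pos_x are only read after `0 ≤ pos_y`/`0 ≤ pos_x` is checked.
  let n : Nat := size.toNat
  let grid : List (List Char) :=
    (List.range n).map (fun _ => (List.range n).map (fun _ => '·'))
  let grid := (List.range n).foldl (pvStamp n) grid
  let grid :=
    if 0 ≤ pos_y ∧ pos_y < size ∧ 0 ≤ pos_x ∧ pos_x < size then
      grid.set pos_y.toNat
        ((grid.getD pos_y.toNat []).set pos_x.toNat (PySem.Dict.getD pvArrows dir_letter '?'))
    else grid
  String.intercalate "\n" (grid.map (fun row => String.ofList row))

-- ===== PORT B =====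
def render_grid_alt (size : Int) (pos_y : Int) (pos_x : Int) (dir_letter : String) : String :=
  let n : Nat := size.toNat
  let rows : List (List Char) :=
    (List.range n).map (fun y =>
      if y = 0 ∨ y = n - 1 then List.replicate n '#'
      else '#' :: List.replicate (n - 2) '·' ++ ['#'])
  let rows :=
    if 0 ≤ pos_y ∧ pos_y < size ∧ 0 ≤ pos_x ∧ pos_x < size then
      -- r[:pos_x] + arrow + r[pos_x+1:] with 0 ≤ pos_x is exactly take/drop
      let r := rows.getD pos_y.toNat []
      rows.set pos_y.toNat
        (r.take pos_x.toNat ++ [PySem.Dict.getD pvArrows dir_letter '?'] ++ r.drop (pos_x.toNat + 1))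
    else rows
  String.intercalate "\n" (rows.map (fun row => String.ofList row))

-- ===== PRECONDITION & SPEC =====
def Spec_render_grid (size : Int) (pos_y : Int) (pos_x : Int) (dir_letter : String) (out : String) : Prop := out = render_grid_alt size pos_y pos_x dir_letter
instance (size : Int) (pos_y : Int) (pos_x : Int) (dir_letter : String) (out : String) : Decidable (Spec_render_grid size pos_y pos_x dir_letter out) := by unfold Spec_render_grid; infer_instance

-- ===== CLAIM (what is proved, stated in full; the proofs are below) =====
def Claim_equal_render_grid : Prop := ∀ (size : Int) (pos_y : Int) (pos_x : Int) (dir_letter : String), Dom_render_grid size pos_y pos_x dir_letter → Spec_render_grid size pos_y pos_x dir_letter (render_grid size pos_y pos_x dir_letter)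

-- ===== LEMMAS AND PROOFS =====

-- grid entry after the first k iterations of A's stamping loop
def pvCellK (n k y x : Nat) : Char :=
  if ((y = 0 ∨ y = n - 1) ∧ x < k) ∨ ((x = 0 ∨ x = n - 1) ∧ y < k) then '#' else '·'

-- "g is the n×n grid whose (y,x) entry is v y x"
def pvGridIs (n : Nat) (v : Nat → Nat → Char) (g : List (List Char)) : Prop :=
  g.length = n ∧ ∀ y, y < n →
    ∃ row, g[y]? = some row ∧ row.length = n ∧ ∀ x, x < n → row[x]? = some (v y x)

lemma pvGridIs_congr {n : Nat} {v v' : Nat → Nat → Char} {g : List (List Char)}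
    (h : pvGridIs n v g) (hvv : ∀ y x, y < n → x < n → v y x = v' y x) :
    pvGridIs n v' g := by
  refine ⟨h.1, fun y hy => ?_⟩
  obtain ⟨row, h1, h2, h3⟩ := h.2 y hy
  exact ⟨row, h1, h2, fun x hx => by rw [h3 x hx, hvv y x hy hx]⟩

lemma pvGridIs_unique {n : Nat} {v : Nat → Nat → Char} {g g' : List (List Char)}
    (h : pvGridIs n v g) (h' : pvGridIs n v g') : g = g' := by
  apply List.ext_getElem?
  intro y
  by_cases hy : y < n
  · obtain ⟨row, h1, h2, h3⟩ := h.2 y hy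
    obtain ⟨row', h1', h2', h3'⟩ := h'.2 y hy
    rw [h1, h1']
    congr 1
    apply List.ext_getElem?
    intro x
    by_cases hx : x < n
    · rw [h3 x hx, h3' x hx]
    · rw [List.getElem?_eq_none (by rw [h2]; omega), List.getElem?_eq_none (by rw [h2']; omega)]
  · rw [List.getElem?_eq_none (by rw [h.1]; omega), List.getElem?_eq_none (by rw [h'.1]; omega)]

-- one `g[i][j] = '#'` write (the shape of each statement in A's loop body)
lemma pv_setRow_is {n : Nat} {v : Nat → Nat → Char} {g : List (List Char)} {i j : Nat}
    (hi : i < n) (hj : j < n) (h : pvGridIs n v g) :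
    pvGridIs n (fun y x => if y = i ∧ x = j then '#' else v y x)
      (g.set i ((g.getD i []).set j '#')) := by
  obtain ⟨hlen, hrows⟩ := h
  obtain ⟨ri, hri, hril, hriv⟩ := hrows i hi
  have hgd : g.getD i [] = ri := by
    rw [List.getD_eq_getElem?_getD, hri]; rfl
  refine ⟨by simp [hlen], fun y hy => ?_⟩
  by_cases hyi : y = i
  · subst hyi
    refine ⟨ri.set j '#', ?_, by simp [hril], fun x hx => ?_⟩
    · rw [hgd, List.getElem?_set, if_pos rfl, if_pos (by omega)]
    · rw [List.getElem?_set]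
      by_cases hxj : j = x
      · subst hxj; simp [hril, hj]
      · rw [if_neg hxj, hriv x hx]
        have hxj' : x ≠ j := fun hh => hxj hh.symm
        simp [hxj']
  · obtain ⟨r, hr', hrl, hrv⟩ := hrows y hy
    refine ⟨r, ?_, hrl, fun x hx => ?_⟩
    · rw [List.getElem?_set, if_neg (fun hh => hyi hh.symm)]
      exact hr'
    · rw [hrv x hx]
      simp [hyi]

-- after k iterations the grid is pvCellK n k
lemma pv_stamp_is {n k : Nat} {g : List (List Char)} (hk : k < n)
    (h : pvGridIs n (pvCellK n k) g) :
    pvGridIs n (pvCellK n (k + 1)) (pvStamp n g k) := by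
  have h0 : 0 < n := by omega
  have hn1 : n - 1 < n := by omega
  have h1 := pv_setRow_is h0 hk h
  have h2 := pv_setRow_is hn1 hk h1
  have h3 := pv_setRow_is hk h0 h2
  have h4 := pv_setRow_is hk hn1 h3
  refine pvGridIs_congr h4 (fun y x hy hx => ?_)
  simp only [pvCellK]
  split_ifs <;> first | rfl | omega

lemma pv_init_is (n : Nat) :
    pvGridIs n (pvCellK n 0)
      ((List.range n).map (fun _ => (List.range n).map (fun _ => '·'))) := by
  refine ⟨by simp, fun y hy => ?_⟩
  refine ⟨(List.range n).map (fun _ => '·'), ?_, by simp, fun x hx => ?_⟩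
  · simp [hy]
  · simp [hx, pvCellK]

lemma pv_fold_is (n : Nat) : ∀ k, k ≤ n →
    pvGridIs n (pvCellK n k)
      ((List.range k).foldl (pvStamp n)
        ((List.range n).map (fun _ => (List.range n).map (fun _ => '·')))) := by
  intro k
  induction k with
  | zero => intro _; simpa using pv_init_is n
  | succ m ih =>
      intro hk
      rw [List.range_succ, List.foldl_append]
      exact pv_stamp_is (by omega) (ih (by omega))

-- B's template rows form the same grid
lemma pv_rows_is (n : Nat) :
    pvGridIs n (pvCellK n n)
      ((List.range n).map (fun y =>
        if y = 0 ∨ y = n - 1 then List.replicate n '#'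
        else '#' :: List.replicate (n - 2) '·' ++ ['#'])) := by
  refine ⟨by simp, fun y hy => ?_⟩
  refine ⟨(if y = 0 ∨ y = n - 1 then List.replicate n '#'
        else '#' :: List.replicate (n - 2) '·' ++ ['#']), ?_, ?_, ?_⟩
  · simp [List.getElem?_range hy]
  · by_cases hb : y = 0 ∨ y = n - 1
    · simp [hb]
    · rw [if_neg hb]
      simp only [List.length_append, List.length_cons, List.length_replicate,
        List.length_nil]
      omega
  · intro x hx
    by_cases hb : y = 0 ∨ y = n - 1
    · rw [if_pos hb]
      simp only [pvCellK, List.getElem?_replicate]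
      split_ifs <;> first | rfl | omega
    · rw [if_neg hb]
      simp only [pvCellK, List.getElem?_cons, List.getElem?_append,
        List.getElem?_replicate, List.getElem?_nil, List.length_replicate,
        List.length_cons]
      split_ifs <;> first | rfl | omega

-- ===== VERDICT (by name: the statement is the Claim_ definition above) =====
theorem render_grid_spec : Claim_equal_render_grid := by
  intro size pos_y pos_x dir_letter _
  simp only [Spec_render_grid, render_grid, render_grid_alt]
  have hA := pv_fold_is size.toNat size.toNat (le_refl _)
  have hB := pv_rows_is size.toNat
  have hG := pvGridIs_unique hA hB
  rw [hG]
  by_cases hc : 0 ≤ pos_y ∧ pos_y < size ∧ 0 ≤ pos_x ∧ pos_x < size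
  · rw [if_pos hc, if_pos hc]
    obtain ⟨hy0, hys, hx0, hxs⟩ := hc
    have hpy : pos_y.toNat < size.toNat := by omega
    have hpx : pos_x.toNat < size.toNat := by omega
    obtain ⟨row, h1, h2, _⟩ := hB.2 pos_y.toNat hpy
    have hrow : ((List.range size.toNat).map (fun y =>
        if y = 0 ∨ y = size.toNat - 1 then List.replicate size.toNat '#'
        else '#' :: List.replicate (size.toNat - 2) '·' ++ ['#'])).getD pos_y.toNat [] = row := by
      rw [List.getD_eq_getElem?_getD, h1]; rfl
    rw [hrow]
    rw [List.set_eq_take_cons_drop (PySem.Dict.getD pvArrows dir_letter '?')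
      (by rw [h2]; omega)]
    simp only [List.append_assoc, List.singleton_append]
  · rw [if_neg hc, if_neg hc]
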